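-- pv_equiv track=rewrite | github.com/mysql/mysql-shell-plugins | migration_plugin/lib/backend/string_utils.py | unquote_db_object
-- ===== SOURCE A (Python) =====
-- def _is_quote(c: str) -> bool:
--     assert 1 == len(c)
--     return '"' == c[0] or "'" == c[0] or "`" == c[0]
--
-- def _span_quoted_string(s: str, p: int = 0) -> tuple[str, int]:
--     assert s
--
--     length = len(s)
--
--     if p >= length:
--         return ("", p)
--
--     quote = s[p]
--
--     assert _is_quote(quote)
--
--     p += 1
--     esc = False
--     done = False
--     unquoted = ""
--
--     while not done and p < length:
--         if quote == s[p]: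
--             if esc:
--                 unquoted += s[p]
--                 esc = False
--             else:
--                 esc = True
--         else:
--             if esc:
--                 done = True
--                 break
--             else:
--                 unquoted += s[p]
--
--         p += 1
--
--     # was the last character a quote?
--     if not done and esc:
--         done = True
--
--     if not done:
--         raise Exception(f"Invalid syntax in identifier: {s}")
--
--     return (unquoted, p)
--
-- def unquote_db_object(obj: str) -> tuple[str, ...]:
--     result: list[str] = []
--     p = 0
--     length = len(obj)
--
--     while p < length:
--         if _is_quote(obj[p]):
--             o, p = _span_quoted_string(obj, p)
--         else:
--             s = p
--             p = obj.find(".", p)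
--
--             if -1 == p:
--                 p = length
--
--             o = obj[s:p]
--
--         result.append(o)
--         p += 1
--
--     return tuple(result)
-- ===== SOURCE B (Python) =====
-- def unquote_db_object(obj: str) -> tuple[str, ...]:
--     parts: list[str] = []
--     cur = ""
--     quote = None   # current quote char, or None when outside quotes
--     pending = False  # inside quotes: previous char was the quote char (close or escape?)
--     for c in obj:
--         if quote is not None:
--             if c == quote:
--                 if pending:
--                     cur += c        # doubled quote -> literal quote
--                     pending = False
--                 else:
--                     pending = True  # maybe the closing quote
--             elif pending:
--                 parts.append(cur)   # quote closed; c is consumed as the separator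
--                 cur = ""
--                 quote = None
--                 pending = False
--             else:
--                 cur += c
--         elif not cur and c in "\"'`":
--             quote = c               # a part starts with a quote
--         elif c == ".":
--             parts.append(cur)       # unquoted part ends
--             cur = ""
--         else:
--             cur += c
--     if quote is not None:
--         if pending:
--             parts.append(cur)       # closing quote at end of string
--         else:
--             raise Exception(f"Invalid syntax in identifier: {obj}")
--     elif cur:
--         parts.append(cur)
--     return tuple(parts)
-- ===== Notes on version B (the rewrite author's own statement) =====
-- stated objective: alternative
-- what changed: A's two-level, index-based decomposition (a quoted-span helper plus a main loop using str.find and slicing) is replaced by a single character-by-character state machine that tracks the current quote char and a pending-closing-quote flag and accumulates each part directly.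
import Mathlib
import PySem

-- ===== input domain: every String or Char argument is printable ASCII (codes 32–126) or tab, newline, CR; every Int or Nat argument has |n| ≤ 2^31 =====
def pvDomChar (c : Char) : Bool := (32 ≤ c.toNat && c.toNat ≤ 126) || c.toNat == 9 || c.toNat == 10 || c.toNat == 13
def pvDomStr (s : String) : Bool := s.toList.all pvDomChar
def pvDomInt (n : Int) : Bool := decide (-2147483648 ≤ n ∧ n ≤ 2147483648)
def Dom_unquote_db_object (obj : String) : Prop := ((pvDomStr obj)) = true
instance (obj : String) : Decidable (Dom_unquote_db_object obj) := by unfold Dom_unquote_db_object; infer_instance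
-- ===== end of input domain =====

-- B replaces A's index-based two-level decomposition (quoted-span helper + find/slice main loop)
-- by a single character-by-character state machine; equivalence of the RETURN value is proved
-- (objective: simpler/alternative decomposition, no speed claim).

-- ===== PORT A =====
def pvIsQuote (c : Char) : Bool := c == '"' || c == '\'' || c == '`'

-- while-loop of _span_quoted_string; none = the Exception path. The loop is encoded as
-- structural recursion on a fuel counter that bounds the remaining iterations (p grows by 1
-- each step, so fuel = s.length - start never expires); the loop condition p < s.length is
-- tested unchanged inside.
def pvSpanAux (quote : Char) (s : List Char) : Nat → Nat → Bool → List Char →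
    Option (List Char × Nat)
  | 0, p, esc, unquoted => if esc then some (unquoted, p) else none
  | fuel + 1, p, esc, unquoted =>
    if h : p < s.length then
      if quote == s[p] then
        if esc then pvSpanAux quote s fuel (p + 1) false (unquoted ++ [s[p]])
        else pvSpanAux quote s fuel (p + 1) true unquoted
      else
        if esc then some (unquoted, p)
        else pvSpanAux quote s fuel (p + 1) false (unquoted ++ [s[p]])
    else
      if esc then some (unquoted, p) else none

def pvSpanQuoted (s : List Char) (p : Nat) : Option (List Char × Nat) :=
  if h : p < s.length then pvSpanAux s[p] s (s.length - p) (p + 1) false []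
  else some ([], p)

-- the main while-loop of unquote_db_object, with the same fuel encoding
def pvMainAux (s : List Char) : Nat → Nat → List (List Char) → Option (List (List Char))
  | 0, _, result => some result
  | fuel + 1, p, result =>
    if h : p < s.length then
      if pvIsQuote s[p] then
        match pvSpanQuoted s p with
        | none => none
        | some (o, p') => pvMainAux s fuel (p' + 1) (result ++ [o])
      else
        let f := PySem.Chars.findFrom s ['.'] (p : Int) none
        let q := if f = -1 then s.length else f.toNat
        pvMainAux s fuel (q + 1) (result ++ [PySem.Chars.slice s (some (p : Int)) (some (q : Int))])
    else some result

def unquote_db_object (obj : String) : List String :=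
  match pvMainAux obj.toList (obj.toList.length + 1) 0 [] with
  | some r => r.map (fun l => String.mk l)
  | none => []          -- A raises Exception here; these inputs are outside Pre_

-- ===== PORT B =====
-- single-pass state machine: quote = current quote char (none = outside quotes),
-- pending = previous char was the quote char (close-or-escape); none = the Exception path
def pvBAux (l : List Char) (parts : List (List Char)) (cur : List Char)
    (quote : Option Char) (pending : Bool) : Option (List (List Char)) :=
  match l with
  | [] =>
    match quote with
    | some _ => if pending then some (parts ++ [cur]) else none
    | none => if cur.isEmpty then some parts else some (parts ++ [cur])
  | c :: rest =>
    match quote with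
    | some q =>
      if c == q then
        if pending then pvBAux rest parts (cur ++ [c]) (some q) false
        else pvBAux rest parts cur (some q) true
      else
        if pending then pvBAux rest (parts ++ [cur]) [] none false
        else pvBAux rest parts (cur ++ [c]) (some q) false
    | none =>
      if cur.isEmpty && (c == '"' || c == '\'' || c == '`') then
        pvBAux rest parts [] (some c) false
      else if c == '.' then pvBAux rest (parts ++ [cur]) [] none false
      else pvBAux rest parts (cur ++ [c]) none false

def unquote_db_object_alt (obj : String) : List String :=
  match pvBAux obj.toList [] [] none false with
  | some parts => parts.map (fun l => String.mk l)
  | none => []          -- B raises the same Exception here; outside Pre_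

-- ===== PRECONDITION & SPEC =====
-- Well-formedness scanner for Pre_ (independent of both ports, structural recursion so that
-- `decide` can evaluate it): quote = quote char currently open, pending = a closing/escape
-- quote was just seen, atStart = the next character begins a new part.
def pvScan : List Char → Option Char → Bool → Bool → Bool
  | [], some _, pending, _ => pending
  | [], none, _, _ => true
  | c :: rest, some q, pending, _ =>
    if c = q then pvScan rest (some q) (!pending) false
    else if pending then pvScan rest none false true
    else pvScan rest (some q) false false
  | c :: rest, none, _, atStart =>
    if atStart && (c = '"' || c = '\'' || c = '`') then pvScan rest (some c) false false
    else if c = '.' then pvScan rest none false true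
    else pvScan rest none false false

-- Pre_ excludes exactly the inputs with an unterminated quoted identifier, on which A
-- raises "Exception: Invalid syntax in identifier: …" (B raises the same exception).
def Pre_unquote_db_object (obj : String) : Prop := pvScan obj.toList none false true = true
instance (obj : String) : Decidable (Pre_unquote_db_object obj) := by
  unfold Pre_unquote_db_object; infer_instance

def pvWitness_unquote_db_object : String := "db.`ta``ble`.'c'"

def Spec_unquote_db_object (obj : String) (out : List String) : Prop :=
  out = unquote_db_object_alt obj
instance (obj : String) (out : List String) : Decidable (Spec_unquote_db_object obj out) := by
  unfold Spec_unquote_db_object; infer_instance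

-- ===== CLAIM (what is proved, stated in full; the proofs are below) =====
def Claim_equal_unquote_db_object : Prop :=
  ∀ (obj : String), Dom_unquote_db_object obj → Pre_unquote_db_object obj →
    Spec_unquote_db_object obj (unquote_db_object obj)

-- ===== LEMMAS AND PROOFS =====

lemma pvSpanAux_ge (q : Char) (s : List Char) :
    ∀ fuel i esc cur o p', pvSpanAux q s fuel i esc cur = some (o, p') → i ≤ p' := by
  intro fuel
  induction fuel with
  | zero =>
    intro i esc cur o p' heq
    rw [pvSpanAux] at heq
    cases esc <;> simp_all
  | succ n ih =>
    intro i esc cur o p' heq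
    rw [pvSpanAux] at heq
    by_cases hi : i < s.length
    · rw [dif_pos hi] at heq
      by_cases hc : (q == s[i]) = true
      · rw [if_pos hc] at heq
        cases esc with
        | true =>
          simp only [] at heq
          have := ih (i + 1) false (cur ++ [s[i]]) o p' heq; omega
        | false =>
          simp only [Bool.false_eq_true] at heq
          have := ih (i + 1) true cur o p' heq; omega
      · rw [if_neg hc] at heq
        cases esc with
        | true => simp at heq; omega
        | false =>
          simp only [Bool.false_eq_true] at heq
          have := ih (i + 1) false (cur ++ [s[i]]) o p' heq; omega
    · rw [dif_neg hi] at heq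
      cases esc <;> simp_all

lemma pv_findGo_dot (l : List Char) : ∀ k, PySem.Chars.find.go ['.'] l k =
    (match l.findIdx? (· == '.') with
     | some j => ((k + j : Nat) : Int)
     | none => -1) := by
  induction l with
  | nil => intro k; simp [PySem.Chars.find.go]
  | cons c t ih =>
    intro k
    rw [PySem.Chars.find.go, List.findIdx?_cons]
    by_cases hc : c = '.'
    · subst hc
      simp [List.isPrefixOf]
    · have hb : (List.isPrefixOf ['.'] (c :: t)) = false := by
        simp [List.isPrefixOf]
        exact fun h => absurd h.symm hc
      have hb2 : (c == '.') = false := by simp [hc]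
      rw [hb, hb2]
      simp only [Bool.false_eq_true, if_false]
      rw [ih (k + 1)]
      cases ht : t.findIdx? (· == '.')
      · simp
      · simp
        ring

lemma pv_find_dot (l : List Char) : PySem.Chars.find l ['.'] =
    (match l.findIdx? (· == '.') with
     | some j => (j : Int)
     | none => -1) := by
  rw [PySem.Chars.find, pv_findGo_dot]
  cases l.findIdx? (· == '.') <;> simp

-- B's in-quote states track A's _span_quoted_string step for step
lemma pv_span_bridge_end (q : Char) (s : List Char) (fuel i : Nat) (esc : Bool)
    (cur : List Char) (parts : List (List Char)) (hi : s.length ≤ i) :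
    pvBAux (s.drop i) parts cur (some q) esc =
      (match pvSpanAux q s fuel i esc cur with
       | none => none
       | some (o, p') => pvBAux (s.drop (p' + 1)) (parts ++ [o]) [] none false) := by
  have hred : pvSpanAux q s fuel i esc cur = if esc then some (cur, i) else none := by
    cases fuel
    · rw [pvSpanAux]
    · rw [pvSpanAux, dif_neg (by omega)]
  rw [hred, List.drop_eq_nil_of_le (by omega)]
  cases esc
  · simp [pvBAux]
  · simp [pvBAux, List.drop_eq_nil_of_le (show s.length ≤ i + 1 by omega)]

lemma pv_span_bridge (q : Char) (s : List Char) :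
    ∀ fuel i esc cur parts, s.length ≤ i + fuel →
    pvBAux (s.drop i) parts cur (some q) esc =
      (match pvSpanAux q s fuel i esc cur with
       | none => none
       | some (o, p') => pvBAux (s.drop (p' + 1)) (parts ++ [o]) [] none false) := by
  intro fuel
  induction fuel with
  | zero =>
    intro i esc cur parts hn
    exact pv_span_bridge_end q s 0 i esc cur parts (by omega)
  | succ n ih =>
    intro i esc cur parts hn
    by_cases hi : i < s.length
    · have hd : s.drop i = s[i] :: s.drop (i + 1) := List.drop_eq_getElem_cons hi
      rw [pvSpanAux, dif_pos hi, hd]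
      by_cases hc : s[i] = q
      · have hq1 : (q == s[i]) = true := by simp [hc]
        have hq2 : (s[i] == q) = true := by simp [hc]
        rw [if_pos hq1]
        cases esc
        · have hl : pvBAux (s[i] :: s.drop (i + 1)) parts cur (some q) false =
              pvBAux (s.drop (i + 1)) parts cur (some q) true := by
            simp [pvBAux, hq2]
          rw [hl]
          simp only [Bool.false_eq_true]
          exact ih (i + 1) true cur parts (by omega)
        · have hl : pvBAux (s[i] :: s.drop (i + 1)) parts cur (some q) true =
              pvBAux (s.drop (i + 1)) parts (cur ++ [s[i]]) (some q) false := by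
            simp [pvBAux, hq2]
          rw [hl]
          simp only []
          exact ih (i + 1) false (cur ++ [s[i]]) parts (by omega)
      · have hq1 : (q == s[i]) = false := by simp; exact fun h => absurd h.symm hc
        have hq2 : (s[i] == q) = false := by simp [hc]
        rw [if_neg (by simp [hq1])]
        cases esc
        · have hl : pvBAux (s[i] :: s.drop (i + 1)) parts cur (some q) false =
              pvBAux (s.drop (i + 1)) parts (cur ++ [s[i]]) (some q) false := by
            simp [pvBAux, hq2]
          rw [hl]
          simp only [Bool.false_eq_true]
          exact ih (i + 1) false (cur ++ [s[i]]) parts (by omega)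
        · have hl : pvBAux (s[i] :: s.drop (i + 1)) parts cur (some q) true =
              pvBAux (s.drop (i + 1)) (parts ++ [cur]) [] none false := by
            simp [pvBAux, hq2]
          rw [hl]
          simp
    · exact pv_span_bridge_end q s (n + 1) i esc cur parts (by omega)

-- B's plain states consume an unquoted segment exactly up to the first '.'
lemma pv_plain_bridge : ∀ (l : List Char) (parts : List (List Char)) (cur : List Char),
    cur ≠ [] →
    pvBAux l parts cur none false =
      (match l.findIdx? (· == '.') with
       | some j => pvBAux (l.drop (j + 1)) (parts ++ [cur ++ l.take j]) [] none false
       | none => some (parts ++ [cur ++ l])) := by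
  intro l
  induction l with
  | nil =>
    intro parts cur hcur
    simp [pvBAux, List.isEmpty_eq_false_iff.mpr hcur]
  | cons c rest ih =>
    intro parts cur hcur
    have hemp : cur.isEmpty = false := List.isEmpty_eq_false_iff.mpr hcur
    rw [List.findIdx?_cons]
    by_cases hdot : c = '.'
    · subst hdot
      have hl : pvBAux ('.' :: rest) parts cur none false =
          pvBAux rest (parts ++ [cur]) [] none false := by
        simp [pvBAux, hemp]
      rw [hl]
      simp
    · have hd2 : (c == '.') = false := by simp [hdot]
      have hl : pvBAux (c :: rest) parts cur none false =
          pvBAux rest parts (cur ++ [c]) none false := by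
        simp [pvBAux, hemp, hd2]
      rw [hl, ih parts (cur ++ [c]) (by simp)]
      rw [hd2]
      simp only [Bool.false_eq_true]
      cases ht : rest.findIdx? (· == '.')
      · simp
      · simp

lemma pv_main_end (s : List Char) (fuel p : Nat) (res : List (List Char))
    (hp : ¬ p < s.length) :
    pvMainAux s fuel p res = pvBAux (s.drop p) res [] none false := by
  have hred : pvMainAux s fuel p res = some res := by
    cases fuel
    · rw [pvMainAux]
    · rw [pvMainAux, dif_neg hp]
  rw [hred, List.drop_eq_nil_of_le (by omega)]
  simp [pvBAux]

lemma pv_main_bridge (s : List Char) :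
    ∀ fuel p res, s.length < p + fuel →
    pvMainAux s fuel p res = pvBAux (s.drop p) res [] none false := by
  intro fuel
  induction fuel with
  | zero =>
    intro p res hn
    exact pv_main_end s 0 p res (by omega)
  | succ n ih =>
    intro p res hn
    by_cases hp : p < s.length
    · have hd : s.drop p = s[p] :: s.drop (p + 1) := List.drop_eq_getElem_cons hp
      rw [pvMainAux, dif_pos hp, hd]
      by_cases hqt : pvIsQuote s[p] = true
      · rw [if_pos hqt]
        have hq : (s[p] == '"' || s[p] == '\'' || s[p] == '`') = true := by
          simpa [pvIsQuote] using hqt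
        have hl : pvBAux (s[p] :: s.drop (p + 1)) res [] none false =
            pvBAux (s.drop (p + 1)) res [] (some s[p]) false := by
          simp [pvBAux, hq]
        rw [hl]
        unfold pvSpanQuoted
        rw [dif_pos hp,
          pv_span_bridge s[p] s (s.length - p) (p + 1) false [] res (by omega)]
        cases hsp : pvSpanAux s[p] s (s.length - p) (p + 1) false [] with
        | none => simp
        | some op =>
          obtain ⟨o, p'⟩ := op
          have hge := pvSpanAux_ge s[p] s (s.length - p) (p + 1) false [] o p' hsp
          simp only
          exact ih (p' + 1) (res ++ [o]) (by omega)
      · rw [if_neg hqt]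
        have hq : (s[p] == '"' || s[p] == '\'' || s[p] == '`') = false := by
          simpa [pvIsQuote] using hqt
        have hfind := pv_find_dot (s.drop p)
        have hfe := PySem.Chars.findFrom_natCast s ['.'] p (le_of_lt hp)
        cases hidx : (s.drop p).findIdx? (· == '.') with
        | none =>
          rw [hidx] at hfind
          simp at hfind
          rw [hfind] at hfe
          norm_num at hfe
          simp only [hfe]
          simp only [if_true]
          have hsl : PySem.Chars.slice s (some (p : Int)) (some (s.length : Int)) = s.drop p := by
            rw [PySem.Chars.slice_eq_listSlice, PySem.List.slice_natCast]
            exact List.take_of_length_le (by simp)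
          rw [hsl, pv_main_end s n (s.length + 1) (res ++ [s.drop p]) (by omega)]
          rw [List.drop_eq_nil_of_le (by omega)]
          -- B side
          rw [hd, List.findIdx?_cons] at hidx
          by_cases hdot : (s[p] == '.') = true
          · rw [if_pos hdot] at hidx; simp at hidx
          · rw [if_neg (by simp_all)] at hidx
            have hrest : (s.drop (p + 1)).findIdx? (· == '.') = none := by
              cases hr : (s.drop (p + 1)).findIdx? (· == '.')
              · rfl
              · rw [hr] at hidx; simp at hidx
            have hl : pvBAux (s[p] :: s.drop (p + 1)) res [] none false =
                pvBAux (s.drop (p + 1)) res [s[p]] none false := by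
              simp [pvBAux, hq, hdot]
            rw [hl, pv_plain_bridge (s.drop (p + 1)) res [s[p]] (by simp), hrest]
            simp only [pvBAux, List.isEmpty_nil]
            rw [hd]
            simp
        | some j =>
          have hj0 : (0 : Int) ≤ (j : Int) := Int.natCast_nonneg j
          rw [hidx] at hfind
          simp at hfind
          rw [hfind] at hfe
          rw [if_neg (show ¬((j : Int) = -1) by omega)] at hfe
          simp only [hfe]
          rw [if_neg (show ¬((p : Int) + (j : Int) = -1) by omega)]
          have htn : ((p : Int) + (j : Int)).toNat = p + j := by omega
          rw [htn]
          have hsl : PySem.Chars.slice s (some (p : Int)) (some ((p + j : Nat) : Int)) =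
              (s.drop p).take j := by
            rw [PySem.Chars.slice_eq_listSlice]
            have := PySem.List.slice_natCast s p (p + j)
            simpa using this
          rw [hsl]
          rw [ih (p + j + 1) (res ++ [(s.drop p).take j]) (by omega)]
          -- B side
          rw [hd, List.findIdx?_cons] at hidx
          by_cases hdot : (s[p] == '.') = true
          · rw [if_pos hdot] at hidx
            have hj : j = 0 := by simp at hidx; omega
            subst hj
            have hl : pvBAux (s[p] :: s.drop (p + 1)) res [] none false =
                pvBAux (s.drop (p + 1)) (res ++ [[]]) [] none false := by
              simp [pvBAux, hq, hdot]
            rw [hl, hd]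
            simp
          · rw [if_neg (by simp_all)] at hidx
            cases hr : (s.drop (p + 1)).findIdx? (· == '.') with
            | none => rw [hr] at hidx; simp at hidx
            | some j' =>
              rw [hr] at hidx
              simp at hidx
              have hl : pvBAux (s[p] :: s.drop (p + 1)) res [] none false =
                  pvBAux (s.drop (p + 1)) res [s[p]] none false := by
                simp [pvBAux, hq, hdot]
              rw [hl, pv_plain_bridge (s.drop (p + 1)) res [s[p]] (by simp), hr]
              simp only
              have e1 : (s.drop (p + 1)).drop (j' + 1) = s.drop (p + j + 1) := by
                rw [List.drop_drop]
                congr 1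
                omega
              have e2 : [s[p]] ++ (s.drop (p + 1)).take j' = (s.drop p).take j := by
                rw [hd, ← hidx, List.take_succ_cons]
                simp
              rw [e1, e2]
    · exact pv_main_end s (n + 1) p res (by omega)

-- ===== VERDICT (by name: the statement is the Claim_ definition above) =====
theorem unquote_db_object_spec : Claim_equal_unquote_db_object := by
  intro obj _ _
  unfold Spec_unquote_db_object unquote_db_object unquote_db_object_alt
  rw [pv_main_bridge obj.toList (obj.toList.length + 1) 0 [] (by omega)]
  simp
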